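-- pv_equiv track=rewrite | github.com/koorbmeh/Archi | src/core/journal.py | _simple_reflection
-- ===== SOURCE A (Python) =====
-- def _simple_reflection(entries: list) -> str:
--     """Generate a simple pattern-based reflection without a model call."""
--     type_counts = {}
--     for e in entries:
--         t = e.get("type", "unknown")
--         type_counts[t] = type_counts.get(t, 0) + 1
--
--     parts = ["Weekly reflection:"]
--     total = len(entries)
--     tasks = type_counts.get("task_completed", 0)
--     convos = type_counts.get("conversation", 0)
--     observations = type_counts.get("observation", 0)
--
--     if tasks:
--         parts.append(f"Completed {tasks} tasks this week.")
--     if convos: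
--         parts.append(f"Had {convos} conversations.")
--     if observations:
--         parts.append(f"Made {observations} observations worth noting.")
--
--     parts.append(f"Total activity: {total} journal entries across {len(type_counts)} categories.")
--     return " ".join(parts)
-- ===== SOURCE B (Python) =====
-- def _simple_reflection(entries: list) -> str:
--     """Generate a simple pattern-based reflection without a model call."""
--     # Sort the entry types, then run-length-encode the sorted list:
--     # runs are the categories, run lengths are the per-type counts.
--     types = sorted(e.get("type", "unknown") for e in entries)
--     runs = []
--     cur, count = None, 0
--     for t in types:
--         if cur is not None and t == cur:
--             count += 1
--         else:
--             if cur is not None: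
--                 runs.append((cur, count))
--             cur, count = t, 1
--     if cur is not None:
--         runs.append((cur, count))
--
--     def run_count(name):
--         for t, c in runs:
--             if t == name:
--                 return c
--         return 0
--
--     tasks = run_count("task_completed")
--     convos = run_count("conversation")
--     observations = run_count("observation")
--
--     parts = ["Weekly reflection:"]
--     if tasks:
--         parts.append(f"Completed {tasks} tasks this week.")
--     if convos:
--         parts.append(f"Had {convos} conversations.")
--     if observations:
--         parts.append(f"Made {observations} observations worth noting.")
--     parts.append(f"Total activity: {len(types)} journal entries across {len(runs)} categories.")
--     return " ".join(parts)
-- ===== Notes on version B (the rewrite author's own statement) =====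
-- stated objective: alternative
-- what changed: Replaces the hash-tally (dict of type counts) with sort-then-group: sort the entry types, run-length-encode the sorted list, and read each reported count and the category count off the runs.
import Mathlib
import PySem

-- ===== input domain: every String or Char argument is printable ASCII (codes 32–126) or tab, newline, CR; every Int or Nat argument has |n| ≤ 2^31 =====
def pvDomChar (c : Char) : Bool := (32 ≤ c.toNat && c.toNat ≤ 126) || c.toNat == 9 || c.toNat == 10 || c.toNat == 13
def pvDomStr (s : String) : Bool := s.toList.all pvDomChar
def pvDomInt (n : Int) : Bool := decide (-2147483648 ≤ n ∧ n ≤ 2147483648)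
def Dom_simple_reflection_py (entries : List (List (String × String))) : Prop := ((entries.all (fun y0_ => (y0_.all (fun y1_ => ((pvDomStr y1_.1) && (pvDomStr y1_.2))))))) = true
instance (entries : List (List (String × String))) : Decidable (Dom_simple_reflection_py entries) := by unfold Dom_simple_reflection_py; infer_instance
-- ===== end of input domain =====

-- B replaces A's hash-tally dict with sort-then-group (run-length encoding of the sorted type list); objective: alternative algorithm, same result.
-- ===== PORT A =====
-- e.get("type", "unknown") on a dict entry (shared lookup helper; the dict convention is first-match)
def pyGetType (e : List (String × String)) : String :=
  (PySem.Dict.mk e).getD "type" "unknown"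

def simple_reflection_py (entries : List (List (String × String))) : String :=
  let type_counts : PySem.Dict String Int :=
    entries.foldl (fun d e =>
      let t := pyGetType e
      d.insert t (d.getD t 0 + 1)) PySem.Dict.empty
  let parts : List String := ["Weekly reflection:"]
  let total : Int := entries.length
  let tasks : Int := type_counts.getD "task_completed" 0
  let convos : Int := type_counts.getD "conversation" 0
  let observations : Int := type_counts.getD "observation" 0
  let parts := if tasks != 0 then parts ++ ["Completed " ++ PySem.Int.toStr tasks ++ " tasks this week."] else parts
  let parts := if convos != 0 then parts ++ ["Had " ++ PySem.Int.toStr convos ++ " conversations."] else parts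
  let parts := if observations != 0 then parts ++ ["Made " ++ PySem.Int.toStr observations ++ " observations worth noting."] else parts
  let parts := parts ++ ["Total activity: " ++ PySem.Int.toStr total ++ " journal entries across " ++ PySem.Int.toStr (type_counts.size : Int) ++ " categories."]
  PySem.Str.join " " parts

-- ===== PORT B =====
-- Source B's grouping for-loop carries the state (cur, count) and emits a run whenever the
-- element changes and once at the end; ported as the structural recursion rleAux on the
-- remaining list with exactly that state (exact: same runs, in the same order).
def rleAux (x : String) (c : Int) : List String → List (String × Int)
  | [] => [(x, c)]
  | y :: ys => if y == x then rleAux x (c + 1) ys else (x, c) :: rleAux y 1 ys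

def rle : List String → List (String × Int)
  | [] => []
  | x :: xs => rleAux x 1 xs

-- Source B's run_count helper: first matching run's length, else 0
def runCount (v : String) : List (String × Int) → Int
  | [] => 0
  | (t, c) :: rest => if t == v then c else runCount v rest

def simple_reflection_py_alt (entries : List (List (String × String))) : String :=
  let types := PySem.List.sorted (entries.map (fun e => pyGetType e)) (fun x => x) false
  let runs := rle types
  let tasks : Int := runCount "task_completed" runs
  let convos : Int := runCount "conversation" runs
  let observations : Int := runCount "observation" runs
  let parts : List String := ["Weekly reflection:"]
  let parts := if tasks != 0 then parts ++ ["Completed " ++ PySem.Int.toStr tasks ++ " tasks this week."] else parts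
  let parts := if convos != 0 then parts ++ ["Had " ++ PySem.Int.toStr convos ++ " conversations."] else parts
  let parts := if observations != 0 then parts ++ ["Made " ++ PySem.Int.toStr observations ++ " observations worth noting."] else parts
  let parts := parts ++ ["Total activity: " ++ PySem.Int.toStr (types.length : Int) ++ " journal entries across " ++ PySem.Int.toStr (runs.length : Int) ++ " categories."]
  PySem.Str.join " " parts

-- ===== PRECONDITION & SPEC =====
def Spec_simple_reflection_py (entries : List (List (String × String))) (out : String) : Prop := out = simple_reflection_py_alt entries
instance (entries : List (List (String × String))) (out : String) : Decidable (Spec_simple_reflection_py entries out) := by unfold Spec_simple_reflection_py; infer_instance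

-- ===== CLAIM (what is proved, stated in full; the proofs are below) =====
def Claim_equal_simple_reflection_py : Prop := ∀ (entries : List (List (String × String))), Dom_simple_reflection_py entries → Spec_simple_reflection_py entries (simple_reflection_py entries)

-- ===== LEMMAS AND PROOFS =====

-- membership in the run keys (any list)
lemma mem_rleAux_keys (v x : String) (c : Int) (l : List String) :
    v ∈ (rleAux x c l).map Prod.fst ↔ v = x ∨ v ∈ l := by
  induction l generalizing x c with
  | nil => simp [rleAux]
  | cons y ys ih =>
    by_cases h : y = x
    · subst h
      simp only [rleAux, beq_self_eq_true, if_pos, ih, List.mem_cons]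
      tauto
    · have hb : (y == x) = false := by simp [h]
      simp only [rleAux, hb, Bool.false_eq_true, if_neg, not_false_iff, List.map_cons,
        List.mem_cons, ih]

-- in a sorted list, the first element never recurs after a different element
lemma not_mem_of_sorted_head {x y : String} {ys : List String}
    (hx : ∀ z ∈ y :: ys, x ≤ z) (hy : (y :: ys).Pairwise (· ≤ ·))
    (hyx : y ≠ x) : x ∉ ys := by
  intro h1
  exact hyx (le_antisymm ((List.pairwise_cons.mp hy).1 x h1) (hx y List.mem_cons_self))

-- on a sorted list the run keys are distinct
lemma nodup_rleAux_keys (x : String) (c : Int) (l : List String)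
    (h : (x :: l).Pairwise (· ≤ ·)) : ((rleAux x c l).map Prod.fst).Nodup := by
  induction l generalizing x c with
  | nil => simp [rleAux]
  | cons y ys ih =>
    rcases List.pairwise_cons.mp h with ⟨hx, hy⟩
    by_cases hyx : y = x
    · have hb : (y == x) = true := by simp [hyx]
      rw [rleAux, if_pos hb]
      refine ih x (c + 1) (List.pairwise_cons.mpr ⟨fun z hz => hx z (List.mem_cons_of_mem _ hz), ?_⟩)
      subst hyx; exact (List.pairwise_cons.mp hy).2
    · have hb : (y == x) = false := by simp [hyx]
      rw [rleAux, if_neg (by simp [hb])]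
      simp only [List.map_cons, List.nodup_cons]
      refine ⟨fun hmem => ?_, ih y 1 hy⟩
      rcases (mem_rleAux_keys x y 1 ys).mp hmem with h1 | h1
      · exact hyx h1.symm
      · exact not_mem_of_sorted_head hx hy hyx h1

-- on a sorted list, looking a value up in the runs yields its count
lemma runCount_rleAux (v x : String) (c : Int) (l : List String)
    (h : (x :: l).Pairwise (· ≤ ·)) :
    runCount v (rleAux x c l) = (if v = x then c + l.count x else (l.count v : Int)) := by
  induction l generalizing x c with
  | nil =>
    simp only [rleAux, runCount, List.count_nil]
    rcases eq_or_ne v x with hv | hv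
    · subst hv; simp
    · simp [hv, Ne.symm hv]
  | cons y ys ih =>
    rcases List.pairwise_cons.mp h with ⟨hx, hy⟩
    by_cases hyx : y = x
    · have hb : (y == x) = true := by simp [hyx]
      rw [rleAux, if_pos hb]
      subst hyx
      rw [ih y (c + 1) (List.pairwise_cons.mpr ⟨fun z hz => hx z (List.mem_cons_of_mem _ hz),
        (List.pairwise_cons.mp hy).2⟩)]
      rcases eq_or_ne v y with hv | hv
      · subst hv; simp [List.count_cons]; push_cast; ring
      · simp [hv, Ne.symm hv]
    · have hb : (y == x) = false := by simp [hyx]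
      rw [rleAux, if_neg (by simp [hb])]
      have hxys : x ∉ ys := not_mem_of_sorted_head hx hy hyx
      rcases eq_or_ne v x with hv | hv
      · subst hv
        have hc : (y :: ys).count v = 0 := by
          rw [List.count_eq_zero]
          simp only [List.mem_cons, not_or]
          exact ⟨Ne.symm hyx, hxys⟩
        simp [runCount, hc]
      · have hb2 : (x == v) = false := by simp [Ne.symm hv]
        rw [runCount, if_neg (by simp [hb2])]
        rw [ih y 1 hy]
        rcases eq_or_ne v y with hvy | hvy
        · subst hvy; simp [hv, List.count_cons]; push_cast; ring
        · simp [hv, hvy, Ne.symm hvy]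

lemma runCount_rle (v : String) (l : List String) (h : l.Pairwise (· ≤ ·)) :
    runCount v (rle l) = (l.count v : Int) := by
  cases l with
  | nil => simp [rle, runCount]
  | cons x xs =>
    rw [rle, runCount_rleAux v x 1 xs h]
    rcases eq_or_ne v x with hv | hv
    · subst hv; simp [List.count_cons]; push_cast; ring
    · simp [hv, Ne.symm hv]

lemma rle_length (l : List String) (h : l.Pairwise (· ≤ ·)) :
    (rle l).length = (PySem.Set.ofList l).length := by
  cases l with
  | nil => simp [rle, PySem.Set.ofList]
  | cons x xs =>
    have hkeys : ((rleAux x 1 xs).map Prod.fst).Perm (PySem.Set.ofList (x :: xs)) := by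
      rw [List.perm_ext_iff_of_nodup (nodup_rleAux_keys x 1 xs h) (PySem.Set.nodup_ofList _)]
      intro a
      rw [mem_rleAux_keys, PySem.Set.mem_ofList]
      simp
    have := hkeys.length_eq
    simpa [rle, List.length_map] using this

lemma counter_size_eq (l : List String) :
    (PySem.Dict.counter l).size = (PySem.Set.ofList l).length := by
  have h := PySem.Dict.keys_counter l
  have h2 : (PySem.Dict.counter l).keys.length = (PySem.Set.ofList l).length := by rw [h]
  simpa [PySem.Dict.size, PySem.Dict.keys, List.length_map] using h2

-- A's tallying loop over entries is the counter of the mapped type list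
lemma counts_eq (entries : List (List (String × String))) :
    entries.foldl (fun d e =>
      let t := pyGetType e
      d.insert t (d.getD t 0 + 1)) PySem.Dict.empty
      = PySem.Dict.counter (entries.map pyGetType) := by
  rw [← PySem.Dict.foldl_insert_getD_add_one_eq_counter, List.foldl_map]

-- ===== VERDICT (by name: the statement is the Claim_ definition above) =====
theorem simple_reflection_py_spec : Claim_equal_simple_reflection_py := by
  intro entries _
  unfold Spec_simple_reflection_py simple_reflection_py simple_reflection_py_alt
  have hperm := PySem.List.sorted_perm (entries.map (fun e => pyGetType e)) (fun x => x) false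
  have hpw : (PySem.List.sorted (entries.map (fun e => pyGetType e)) (fun x => x) false).Pairwise (· ≤ ·) := by
    simpa using PySem.List.sorted_pairwise (entries.map (fun e => pyGetType e)) (fun x => x)
  simp only [counts_eq]
  rw [runCount_rle _ _ hpw, runCount_rle _ _ hpw, runCount_rle _ _ hpw, rle_length _ hpw]
  have hofl : (PySem.Set.ofList (PySem.List.sorted (entries.map (fun e => pyGetType e)) (fun x => x) false)).length
      = (PySem.Set.ofList (entries.map (fun e => pyGetType e))).length := by
    have hp : (PySem.Set.ofList (PySem.List.sorted (entries.map (fun e => pyGetType e)) (fun x => x) false)).Perm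
        (PySem.Set.ofList (entries.map (fun e => pyGetType e))) := by
      rw [List.perm_ext_iff_of_nodup (PySem.Set.nodup_ofList _) (PySem.Set.nodup_ofList _)]
      intro a
      rw [PySem.Set.mem_ofList, PySem.Set.mem_ofList, PySem.List.mem_sorted]
    exact hp.length_eq
  simp only [PySem.Dict.getD_counter, hperm.count_eq, hofl, counter_size_eq, hperm.length_eq,
    List.length_map]
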